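-- pv_equiv track=rewrite | github.com/Xiaomut/DataStruct | Leetcode/2021/0404_str/205. Isomorphic Strings.py | func
-- ===== SOURCE A (Python) =====
-- def func(temp):
--     num = 1
--     dics = {}
--     temp_list = ''
--     for i in temp:
--         if i not in dics.keys():
--             dics[i] = num
--             temp_list += str(num)
--             num += 1
--         else:
--             temp_list += str(dics[i])
--     return temp_list
-- ===== SOURCE B (Python) =====
-- def func(temp):
--     # dict-free: each character's code is the number of distinct characters
--     # in the prefix of temp ending at that character's first occurrence
--     return ''.join(str(len(set(temp[:temp.index(c) + 1]))) for c in temp)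
-- ===== Notes on version B (the rewrite author's own statement) =====
-- stated objective: alternative
-- what changed: A runs one stateful pass with a dict and a running counter assigning numbers at first sight; B keeps no mapping or counter at all and computes each character's code independently as the number of distinct characters in the prefix up to that character's first occurrence (len(set(temp[:temp.index(c)+1]))).
import Mathlib
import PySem

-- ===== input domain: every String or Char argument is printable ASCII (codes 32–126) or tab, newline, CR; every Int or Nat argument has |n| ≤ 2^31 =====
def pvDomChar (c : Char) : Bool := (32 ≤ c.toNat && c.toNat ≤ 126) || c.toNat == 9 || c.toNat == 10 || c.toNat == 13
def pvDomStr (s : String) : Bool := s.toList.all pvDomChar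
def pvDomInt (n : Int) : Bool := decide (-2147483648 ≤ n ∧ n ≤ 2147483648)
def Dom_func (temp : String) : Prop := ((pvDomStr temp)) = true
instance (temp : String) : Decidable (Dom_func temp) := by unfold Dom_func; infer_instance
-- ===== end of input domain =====

-- B drops A's dict and running counter entirely: each character's code is computed
-- independently as the number of distinct characters in the prefix up to that
-- character's first occurrence; objective: alternative (stateless recomputation instead of carried state).

-- ===== PORT A =====
-- the for-loop of A, state = (num, dics, temp_list) carried as arguments
def funcLoop : List Char → Int → PySem.Dict Char Int → List Char → List Char
  | [], _, _, tl => tl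
  | i :: rest, num, dics, tl =>
    if dics.contains i = false then
      funcLoop rest (num + 1) (dics.insert i num) (tl ++ PySem.Int.toChars num)
    else
      funcLoop rest num dics (tl ++ PySem.Int.toChars (dics.getD i 0))

def func (temp : String) : String :=
  String.ofList (funcLoop temp.toList 1 PySem.Dict.empty [])

-- ===== PORT B =====
-- temp.index(c) never raises here (c is drawn from temp), so it is ported as
-- (PySem.List.index? … c).getD 0; set(…) is PySem.Set.ofList, len is Set.len.
def func_alt (temp : String) : String :=
  PySem.Str.join "" (temp.toList.map (fun c =>
    PySem.Int.toStr
      ((PySem.Set.len (PySem.Set.ofList (PySem.List.slice temp.toList (some 0)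
        (some (((PySem.List.index? temp.toList c).getD 0 : Int) + 1)))) : Int))))

-- ===== PRECONDITION & SPEC =====
def Spec_func (temp : String) (out : String) : Prop := out = func_alt temp
instance (temp : String) (out : String) : Decidable (Spec_func temp out) := by unfold Spec_func; infer_instance

-- ===== CLAIM (what is proved, stated in full; the proofs are below) =====
def Claim_equal_func : Prop := ∀ (temp : String), Dom_func temp → Spec_func temp (func temp)

-- ===== LEMMAS AND PROOFS =====

-- common reference: the canonical numbering emitted position by position, s = chars seen so far
def pvCode (s : List Char) : List Char → List Char
  | [] => []
  | c :: l =>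
    if c ∈ s then
      PySem.Int.toChars (((PySem.List.index? s c).getD 0 : Int) + 1) ++ pvCode s l
    else
      PySem.Int.toChars ((s.length : Int) + 1) ++ pvCode (s ++ [c]) l

lemma funcLoop_code (l : List Char) : ∀ (s : List Char) (dics : PySem.Dict Char Int) (tl : List Char),
    s.Nodup →
    (∀ c, dics.contains c = decide (c ∈ s)) →
    (∀ c ∈ s, dics.getD c 0 = ((PySem.List.index? s c).getD 0 : Int) + 1) →
    funcLoop l ((s.length : Int) + 1) dics tl = tl ++ pvCode s l := by
  induction l with
  | nil => intro s dics tl _ _ _; simp [funcLoop, pvCode]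
  | cons c l ih =>
    intro s dics tl hnd hcont hget
    by_cases hc : c ∈ s
    · have : dics.contains c = true := by rw [hcont]; simp [hc]
      simp only [funcLoop, this]
      rw [if_neg (by simp)]
      rw [hget c hc, ih s dics _ hnd hcont hget]
      simp [pvCode, hc]
    · have : dics.contains c = false := by rw [hcont]; simp [hc]
      simp only [funcLoop, this]
      rw [if_pos trivial]
      have hlen : ((s.length : Int) + 1) + 1 = (((s ++ [c]).length : Int) + 1) := by
        simp only [List.length_append, List.length_cons, List.length_nil]; push_cast; ring
      rw [hlen, ih (s ++ [c]) _ _ (by simp [List.nodup_append, hnd]; intro a ha he; subst he; exact hc ha)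
        (by
          intro c'
          rw [PySem.Dict.contains_insert, hcont]
          by_cases h' : c' = c <;> simp [h', hc])
        (by
          intro c' hc'
          rcases (List.mem_append.mp hc') with h' | h'
          · have hne : c' ≠ c := fun he => hc (he ▸ h')
            rw [PySem.Dict.getD_insert_of_ne _ _ _ hne,
                PySem.List.index?_append_of_mem [c] h', hget c' h']
          · have he : c' = c := by simpa using h'
            subst he
            rw [PySem.Dict.getD_insert_self,
                PySem.List.index?_append_singleton_self s c' hc]
            simp)]
      simp [pvCode, hc]

lemma join_nil_eq_flatten (xs : List (List Char)) : PySem.Chars.join [] xs = xs.flatten := by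
  induction xs with
  | nil => rfl
  | cons h t ih =>
    cases t with
    | nil => simp [PySem.Chars.join, List.intercalate]
    | cons h2 t2 =>
      simp only [PySem.Chars.join, List.intercalate] at *
      simp_all [List.intersperse]

lemma foldl_add_prefix (l : List Char) : ∀ s : List Char, ∃ t, l.foldl PySem.Set.add s = s ++ t := by
  induction l with
  | nil => intro s; exact ⟨[], by simp⟩
  | cons c l ih =>
    intro s
    obtain ⟨t, ht⟩ := ih (PySem.Set.add s c)
    by_cases hc : c ∈ s
    · exact ⟨t, by simpa [PySem.Set.add, PySem.Set.contains, hc] using ht⟩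
    · exact ⟨c :: t, by simpa [PySem.Set.add, PySem.Set.contains, hc] using ht⟩

lemma code_eq_map (l : List Char) : ∀ s : List Char,
    pvCode s l = (l.map (fun c =>
      PySem.Int.toChars (((PySem.List.index? (l.foldl PySem.Set.add s) c).getD 0 : Int) + 1))).flatten := by
  induction l with
  | nil => intro s; simp [pvCode]
  | cons c l ih =>
    intro s
    by_cases hc : c ∈ s
    · have hadd : PySem.Set.add s c = s := by simp [PySem.Set.add, PySem.Set.contains, hc]
      obtain ⟨t, ht⟩ := foldl_add_prefix l s
      simp only [pvCode, if_pos hc, List.foldl_cons, hadd, List.map_cons, List.flatten_cons, ih s]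
      rw [ht, PySem.List.index?_append_of_mem t hc]
    · have hadd : PySem.Set.add s c = s ++ [c] := by simp [PySem.Set.add, PySem.Set.contains, hc]
      obtain ⟨t, ht⟩ := foldl_add_prefix l (s ++ [c])
      simp only [pvCode, if_neg hc, List.foldl_cons, hadd, List.map_cons, List.flatten_cons,
        ih (s ++ [c])]
      rw [ht, PySem.List.index?_append_of_mem _ (by simp : c ∈ s ++ [c]),
          PySem.List.index?_append_singleton_self s c hc]
      simp

-- per-character bridge: A's rank (first-occurrence index in the dedup of l, +1)
-- equals B's distinct-count of the prefix up to c's first occurrence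
lemma rank_eq_prefix_card (l : List Char) (c : Char) (hc : c ∈ l) :
    ((PySem.List.index? (PySem.Set.ofList l) c).getD 0 : Int) + 1
      = ((PySem.Set.ofList (l.take (((PySem.List.index? l c).getD 0 : Nat) + 1))).length : Int) := by
  obtain ⟨j, hj⟩ := Option.isSome_iff_exists.mp ((PySem.List.index?_isSome_iff (xs := l) (v := c)).mpr hc)
  obtain ⟨p, suf, hl, hp, hcp⟩ := (PySem.List.index?_eq_some_iff l c j).mp hj
  have htake : l.take (j + 1) = p ++ [c] := by
    subst hl hp
    simp [List.take_append]
  have hofp : c ∉ PySem.Set.ofList p := fun h => hcp ((PySem.Set.mem_ofList _ _).mp h)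
  have hofpc : PySem.Set.ofList (p ++ [c]) = PySem.Set.ofList p ++ [c] := by
    rw [PySem.Set.ofList_eq_foldl, List.foldl_append, ← PySem.Set.ofList_eq_foldl]
    simp [PySem.Set.add, PySem.Set.contains, hofp]
  have hofl : ∃ t, PySem.Set.ofList l = (PySem.Set.ofList p ++ [c]) ++ t := by
    obtain ⟨t, ht⟩ := foldl_add_prefix suf (PySem.Set.ofList (p ++ [c]))
    refine ⟨t, ?_⟩
    rw [hl, show p ++ c :: suf = (p ++ [c]) ++ suf by simp,
        PySem.Set.ofList_eq_foldl, List.foldl_append, ← PySem.Set.ofList_eq_foldl, ht, hofpc]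
  obtain ⟨t, ht⟩ := hofl
  rw [hj, ht, PySem.List.index?_append_of_mem t (by simp : c ∈ PySem.Set.ofList p ++ [c]),
      PySem.List.index?_append_singleton_self _ c hofp]
  simp [htake, hofpc]

-- ===== VERDICT (by name: the statement is the Claim_ definition above) =====
theorem func_spec : Claim_equal_func := by
  unfold Claim_equal_func
  intro temp _
  unfold Spec_func func func_alt
  apply String.toList_inj.mp
  simp only [String.toList_ofList, PySem.Str.toList_join, String.toList_empty,
    List.map_map, join_nil_eq_flatten]
  have hA : funcLoop temp.toList 1 PySem.Dict.empty [] = pvCode [] temp.toList := by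
    have := funcLoop_code temp.toList [] PySem.Dict.empty [] List.nodup_nil
      (by intro c; simp [PySem.Dict.contains, PySem.Dict.empty]) (by intro c hc; simp at hc)
    simpa using this
  rw [hA, code_eq_map temp.toList []]
  congr 1
  apply List.map_congr_left
  intro c hc
  have h := rank_eq_prefix_card temp.toList c hc
  rw [Function.comp, PySem.Int.toList_toStr, ← PySem.Set.ofList_eq_foldl]
  have hsl : PySem.List.slice temp.toList (some 0)
      (some (((PySem.List.index? temp.toList c).getD 0 : Int) + 1))
      = temp.toList.take ((PySem.List.index? temp.toList c).getD 0 + 1) := by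
    rw [show ((PySem.List.index? temp.toList c).getD 0 : Int) + 1
        = (((PySem.List.index? temp.toList c).getD 0 + 1 : Nat) : Int) by push_cast; ring,
      PySem.List.slice_zero_start, PySem.List.slice_to_natCast]
  simp only [hsl, PySem.Set.len]
  rw [h]
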